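-- pv_equiv track=rewrite | github.com/ShuhaoZQGG/AlgoExpertHubTest | Valid Starting City/Solution 2/Valid Starting City.py | validStartingCity
-- ===== SOURCE A (Python) =====
-- def validStartingCity(distances, fuel, mpg):
--     # Write your code here.
--     leastAllowableDistance = 0
--     city = 0
--     currentAllowableDistance = 0
--     for i in range(len(distances)):
--         if currentAllowableDistance < leastAllowableDistance:
--             leastAllowableDistance = currentAllowableDistance
--             city = i
--         currentAllowableDistance += fuel[i] * mpg - distances[i]
--     return city
-- ===== SOURCE B (Python) =====
-- def validStartingCity(distances, fuel, mpg):
--     # Build the table of prefix sums of net gains (value on arrival at each city),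
--     # then return the index of its first minimum.
--     prefixes = [0]
--     for d, f in zip(distances[:-1], fuel):
--         prefixes.append(prefixes[-1] + f * mpg - d)
--     return prefixes.index(min(prefixes))
-- ===== Notes on version B (the rewrite author's own statement) =====
-- stated objective: alternative
-- what changed: B separates the work into two passes: it first materialises the full table of prefix sums of the net gains fuel[i]*mpg - distances[i], then returns the first index of the table's minimum via min + list.index, instead of A's single fused scan that maintains a running minimum and its index.
import Mathlib
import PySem

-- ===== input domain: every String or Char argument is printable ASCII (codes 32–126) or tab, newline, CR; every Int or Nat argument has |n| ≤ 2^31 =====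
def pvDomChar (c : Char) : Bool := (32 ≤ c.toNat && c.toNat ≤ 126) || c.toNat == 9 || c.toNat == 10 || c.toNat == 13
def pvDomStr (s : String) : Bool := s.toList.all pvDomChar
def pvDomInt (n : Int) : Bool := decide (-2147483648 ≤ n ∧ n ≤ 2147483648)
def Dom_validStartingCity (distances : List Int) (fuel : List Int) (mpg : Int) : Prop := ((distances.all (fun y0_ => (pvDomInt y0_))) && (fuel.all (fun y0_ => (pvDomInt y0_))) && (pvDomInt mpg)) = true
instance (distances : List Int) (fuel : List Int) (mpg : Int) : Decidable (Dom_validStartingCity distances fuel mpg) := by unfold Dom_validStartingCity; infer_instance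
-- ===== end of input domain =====

-- B builds the full prefix-sum table of the net gains and then takes the first index of its
-- minimum (two separate passes), instead of A's fused running-minimum scan; same cost.

-- ===== PORT A =====
-- loop body of A's for-loop: state (leastAllowableDistance, city, currentAllowableDistance)
def stepA (distances fuel : List Int) (mpg : Int) (s : Int × Int × Int) (i : Int) : Int × Int × Int :=
  (if s.2.2 < s.1 then s.2.2 else s.1,
   if s.2.2 < s.1 then i else s.2.1,
   s.2.2 + PySem.List.pyGetD fuel i 0 * mpg - PySem.List.pyGetD distances i 0)

def validStartingCity (distances : List Int) (fuel : List Int) (mpg : Int) : Int :=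
  ((PySem.List.pyRange 0 (distances.length : Int) 1).foldl (stepA distances fuel mpg)
    (0, 0, 0)).2.1

-- ===== PORT B =====
-- loop body of B's for-loop: prefixes.append(prefixes[-1] + f * mpg - d)
def stepB (mpg : Int) (ps : List Int) (df : Int × Int) : List Int :=
  ps ++ [PySem.List.pyGetD ps (-1) 0 + df.2 * mpg - df.1]

def validStartingCity_alt (distances : List Int) (fuel : List Int) (mpg : Int) : Int :=
  let prefixes := ((PySem.List.slice distances none (some (-1))).zip fuel).foldl (stepB mpg) [0]
  let m := (PySem.List.min? prefixes (fun x => x)).getD 0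
  (((PySem.List.index? prefixes m).getD 0 : Nat) : Int)

-- ===== PRECONDITION & SPEC =====
-- Pre_ excludes exactly the inputs where the Python A raises IndexError:
-- A reads fuel[i] for every i < len(distances), so it needs len(fuel) ≥ len(distances).
def Pre_validStartingCity (distances : List Int) (fuel : List Int) (mpg : Int) : Prop :=
  distances.length ≤ fuel.length
instance (distances : List Int) (fuel : List Int) (mpg : Int) : Decidable (Pre_validStartingCity distances fuel mpg) := by unfold Pre_validStartingCity; infer_instance

def pvWitness_validStartingCity : List Int × List Int × Int := ([4, 2, 3], [1, 3, 1], 2)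

def Spec_validStartingCity (distances : List Int) (fuel : List Int) (mpg : Int) (out : Int) : Prop := out = validStartingCity_alt distances fuel mpg
instance (distances : List Int) (fuel : List Int) (mpg : Int) (out : Int) : Decidable (Spec_validStartingCity distances fuel mpg out) := by unfold Spec_validStartingCity; infer_instance

-- ===== CLAIM (what is proved, stated in full; the proofs are below) =====
def Claim_equal_validStartingCity : Prop := ∀ (distances : List Int) (fuel : List Int) (mpg : Int), Dom_validStartingCity distances fuel mpg → Pre_validStartingCity distances fuel mpg → Spec_validStartingCity distances fuel mpg (validStartingCity distances fuel mpg)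

-- ===== LEMMAS AND PROOFS =====

-- the net gains fuel[i] * mpg - distances[i], one per city
def netsOf (distances fuel : List Int) (mpg : Int) : List Int :=
  (distances.zip fuel).map (fun p => p.2 * mpg - p.1)

-- the prefix sums COMPARED by A's loop (one entry per net: the tank value on arrival)
def prefsC (cur : Int) : List Int → List Int
  | [] => []
  | t :: ts => cur :: prefsC (cur + t) ts

-- the full prefix-sum table B builds (one more entry than nets)
def prefs (cur : Int) : List Int → List Int
  | [] => [cur]
  | t :: ts => cur :: prefs (cur + t) ts

-- A's scan, abstracted over the list of compared prefix values
def argmin : List Int → Int → Int → Int → Int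
  | [], _, city, _ => city
  | p :: ps, least, city, i =>
    if p < least then argmin ps p i (i + 1) else argmin ps least city (i + 1)

theorem argmin_spec (ps : List Int) : ∀ (least city i : Int),
    argmin ps least city i =
      match ps.min? with
      | none => city
      | some m => if m < least then i + (ps.idxOf m : Int) else city := by
  induction ps with
  | nil => intro least city i; simp [argmin]
  | cons x ts ih =>
    intro least city i
    cases hts : ts.min? with
    | none =>
      have hnil : ts = [] := List.min?_eq_none_iff.mp hts
      subst hnil
      simp only [argmin, List.min?_cons', List.foldl_nil, List.idxOf_cons_self]
      split_ifs <;> simp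
    | some mt =>
      rw [List.min?_cons, hts]
      simp only [Option.elim_some, argmin]
      by_cases hx : x < least
      · rw [if_pos hx, ih x i (i+1), hts]
        dsimp only
        by_cases hmt : mt < x
        · rw [if_pos hmt, if_pos (by omega), min_eq_right (by omega),
            List.idxOf_cons_ne ts (by omega : x ≠ mt)]
          push_cast; ring
        · rw [if_neg hmt, if_pos (by omega), min_eq_left (by omega), List.idxOf_cons_self]
          simp
      · rw [if_neg hx, ih least city (i+1), hts]
        dsimp only
        by_cases hmt : mt < least
        · rw [if_pos hmt, if_pos (by omega), min_eq_right (by omega),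
            List.idxOf_cons_ne ts (by omega : x ≠ mt)]
          push_cast; ring
        · rw [if_neg hmt, if_neg (by omega)]

theorem prefs_dropLast (ts : List Int) : ∀ (cur : Int), ts ≠ [] →
    prefs cur ts.dropLast = prefsC cur ts := by
  induction ts with
  | nil => intro cur h; exact absurd rfl h
  | cons t ts ih =>
    intro cur _
    cases hts : ts with
    | nil => simp [prefs, prefsC]
    | cons t' ts' =>
      rw [← hts, List.dropLast_cons_of_ne_nil (by simp [hts])]
      simp only [prefs, prefsC]
      rw [ih (cur + t) (by simp [hts])]

theorem dropLast_zip (ds : List Int) : ∀ (fs : List Int), ds.length ≤ fs.length →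
    ds.dropLast.zip fs = (ds.zip fs).dropLast := by
  induction ds with
  | nil => simp
  | cons d ds ih =>
    intro fs h
    cases fs with
    | nil => simp at h
    | cons f fs =>
      cases ds with
      | nil => cases fs <;> simp
      | cons d' ds' =>
        have hlen : (d' :: ds').length ≤ fs.length := by simp at h ⊢; omega
        rw [List.dropLast_cons_of_ne_nil (by simp), List.zip_cons_cons, ih fs hlen,
          List.zip_cons_cons, List.dropLast_cons_of_ne_nil]
        intro hc
        rcases List.zip_eq_nil_iff.mp hc with h1 | h1
        · simp at h1
        · subst h1; simp at hlen

theorem idxOf?_eq_some (ps : List Int) (v : Int) (h : v ∈ ps) :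
    List.idxOf? v ps = some (ps.idxOf v) := by
  have h1 : (List.idxOf? v ps).isSome := by simp [List.isSome_idxOf?, h]
  rw [List.idxOf_eq_getD_idxOf?]
  cases h2 : List.idxOf? v ps with
  | none => rw [h2] at h1; simp at h1
  | some k => simp

theorem netsOf_length (distances fuel : List Int) (mpg : Int)
    (h : distances.length ≤ fuel.length) :
    (netsOf distances fuel mpg).length = distances.length := by
  simp [netsOf]; omega

-- A's fold from index k equals the abstract scan over the remaining compared prefixes
theorem foldA_eq (distances fuel : List Int) (mpg : Int) (h : distances.length ≤ fuel.length) :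
    ∀ (d k : Nat), distances.length - k = d → ∀ (least city cur : Int),
    ((PySem.List.pyRange (k : Int) (distances.length : Int) 1).foldl (stepA distances fuel mpg)
        (least, city, cur)).2.1
      = argmin (prefsC cur ((netsOf distances fuel mpg).drop k)) least city (k : Int) := by
  intro d
  induction d with
  | zero =>
    intro k hk least city cur
    have hk' : distances.length ≤ k := by omega
    rw [PySem.List.pyRange_one_eq_nil (by exact_mod_cast hk'),
      List.drop_eq_nil_of_le (by rw [netsOf_length distances fuel mpg h]; omega)]
    simp [argmin, prefsC]
  | succ d ih =>
    intro k hk least city cur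
    have hkn : k < distances.length := by omega
    have hkf : k < fuel.length := lt_of_lt_of_le hkn h
    have hknets : k < (netsOf distances fuel mpg).length := by
      rw [netsOf_length distances fuel mpg h]; omega
    rw [PySem.List.pyRange_one_cons (by exact_mod_cast hkn), List.foldl_cons,
      List.drop_eq_getElem_cons hknets]
    have hval : (netsOf distances fuel mpg)[k]'hknets = fuel[k]'hkf * mpg - distances[k]'hkn := by
      simp [netsOf, List.getElem_zip]
    have hstep : stepA distances fuel mpg (least, city, cur) (k : Int) =
        (if cur < least then cur else least, if cur < least then (k : Int) else city,
         cur + fuel[k]'hkf * mpg - distances[k]'hkn) := by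
      simp [stepA, PySem.List.pyGetD_natCast, List.getElem?_eq_getElem hkf,
        List.getElem?_eq_getElem hkn]
    rw [hstep, hval]
    simp only [prefsC, argmin]
    by_cases hc : cur < least
    · rw [if_pos hc, if_pos hc, if_pos hc]
      have := ih (k + 1) (by omega) cur (k : Int) (cur + (fuel[k]'hkf * mpg - distances[k]'hkn))
      push_cast at this ⊢
      rw [← this]
      ring_nf
    · rw [if_neg hc, if_neg hc, if_neg hc]
      have := ih (k + 1) (by omega) least city (cur + (fuel[k]'hkf * mpg - distances[k]'hkn))
      push_cast at this ⊢
      rw [← this]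
      ring_nf

-- B's table-building fold appends the prefix sums to the accumulator
theorem foldB_eq (mpg : Int) : ∀ (ts : List (Int × Int)) (ps : List Int) (hps : ps ≠ []),
    ts.foldl (stepB mpg) ps
      = ps.dropLast ++ prefs (ps.getLast hps) (ts.map (fun p => p.2 * mpg - p.1)) := by
  intro ts
  induction ts with
  | nil =>
    intro ps hps
    simp only [List.foldl_nil, List.map_nil, prefs]
    exact (List.dropLast_append_getLast hps).symm
  | cons df ts ih =>
    intro ps hps
    have hstep : stepB mpg ps df = ps ++ [ps.getLast hps + df.2 * mpg - df.1] := by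
      simp [stepB, PySem.List.pyGetD_neg_one ps 0 hps]
    rw [List.foldl_cons, hstep, ih (ps ++ [ps.getLast hps + df.2 * mpg - df.1]) (by simp),
      List.dropLast_concat, List.getLast_concat]
    simp only [List.map_cons, prefs]
    rw [show ps.dropLast ++ ps.getLast hps ::
          prefs (ps.getLast hps + (df.2 * mpg - df.1)) (ts.map (fun p => p.2 * mpg - p.1))
        = (ps.dropLast ++ [ps.getLast hps]) ++
          prefs (ps.getLast hps + (df.2 * mpg - df.1)) (ts.map (fun p => p.2 * mpg - p.1)) by simp,
      List.dropLast_append_getLast hps]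
    ring_nf

theorem validStartingCity_spec' (distances fuel : List Int) (mpg : Int)
    (h : distances.length ≤ fuel.length) :
    validStartingCity distances fuel mpg = validStartingCity_alt distances fuel mpg := by
  cases hd : distances with
  | nil =>
    subst hd
    simp [validStartingCity, validStartingCity_alt, PySem.List.pyRange_one_eq_nil,
      PySem.List.slice_to_neg_one, PySem.List.min?_id_cons, PySem.List.index?_eq_idxOf?,
      List.idxOf?_cons]
  | cons d0 ds =>
    rw [← hd]
    have hne : distances ≠ [] := by subst hd; simp
    -- the compared prefix list
    have hnets_ne : netsOf distances fuel mpg ≠ [] := by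
      have := netsOf_length distances fuel mpg h
      intro hc; rw [hc] at this; subst hd; simp at this
    -- B's prefixes list equals prefsC 0 nets
    have hprefixes : ((PySem.List.slice distances none (some (-1))).zip fuel).foldl (stepB mpg) [0]
        = prefsC 0 (netsOf distances fuel mpg) := by
      rw [PySem.List.slice_to_neg_one, dropLast_zip distances fuel h,
        foldB_eq mpg ((distances.zip fuel).dropLast) [0] (by simp)]
      simp only [List.dropLast_singleton, List.getLast_singleton, List.nil_append]
      rw [List.map_dropLast, ← netsOf]
      exact prefs_dropLast (netsOf distances fuel mpg) 0 hnets_ne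
    -- A equals the abstract scan
    have hA : validStartingCity distances fuel mpg
        = argmin (prefsC 0 (netsOf distances fuel mpg)) 0 0 0 := by
      have := foldA_eq distances fuel mpg h distances.length 0 (by omega) 0 0 0
      simpa [validStartingCity] using this
    -- the compared prefix list starts with 0
    obtain ⟨t, ts, hnets⟩ : ∃ t ts, netsOf distances fuel mpg = t :: ts := by
      cases hx : netsOf distances fuel mpg with
      | nil => exact absurd hx hnets_ne
      | cons t ts => exact ⟨t, ts, rfl⟩
    rw [validStartingCity_alt]
    simp only [hprefixes, hnets, prefsC]
    set rest := prefsC (0 + t) ts with hrest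
    -- the minimum value
    have hmin : PySem.List.min? (0 :: rest) (fun x => x) = some (rest.foldl min 0) :=
      PySem.List.min?_id_cons 0 rest
    have hminL : (0 :: rest).min? = some (rest.foldl min 0) := List.min?_cons'
    set m := rest.foldl min 0 with hm
    have hmem : m ∈ (0 :: rest) := PySem.List.min?_mem hmin
    have hle : m ≤ 0 := PySem.List.min?_isMin hmin 0 (by simp)
    rw [hA, hnets]
    simp only [prefsC, ← hrest]
    rw [argmin_spec (0 :: rest) 0 0 0, hminL]
    dsimp only
    rw [hmin]
    simp only [Option.getD_some, PySem.List.index?_eq_idxOf?, idxOf?_eq_some (0 :: rest) m hmem,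
      Option.getD_some]
    by_cases hlt : m < 0
    · rw [if_pos hlt]; ring
    · rw [if_neg hlt]
      have hm0 : m = 0 := by omega
      rw [hm0, List.idxOf_cons_self]
      simp

-- ===== VERDICT (by name: the statement is the Claim_ definition above) =====
theorem validStartingCity_spec : Claim_equal_validStartingCity := by
  intro distances fuel mpg _ hpre
  exact validStartingCity_spec' distances fuel mpg hpre
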